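-- pv_equiv track=rewrite | github.com/pypi-data/pypi-mirror-401 | packages/numnerd/numnerd-0.0.3.tar.gz/numnerd-0.0.3/src/numnerd/sequences.py | narayana_cows
-- ===== SOURCE A (Python) =====
-- def narayana_cows(n: int) -> int:
--     """
--     Returns the n-th term of Narayana's cows sequence.
--     Recurrence: C(n) = C(n-1) + C(n-3), starting 1, 1, 1.
--
--     Args:
--         n (int): Index (non-negative).
--
--     Returns:
--         int: n-th term.
--     """
--     if n < 0:
--         raise ValueError("n must be non-negative")
--     if n <= 2:
--         return 1
--
--     c0, c1, c2 = 1, 1, 1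
--     for _ in range(3, n + 1):
--         c_next = c2 + c0
--         c0, c1, c2 = c1, c2, c_next
--     return c2
-- ===== SOURCE B (Python) =====
-- def _mul(a, b):
--     # 3x3 integer matrix product (tuples of row-tuples)
--     return tuple(
--         tuple(sum(a[i][k] * b[k][j] for k in range(3)) for j in range(3))
--         for i in range(3)
--     )
--
--
-- def _matpow(m, k):
--     # m**k by binary exponentiation
--     if k == 0:
--         return ((1, 0, 0), (0, 1, 0), (0, 0, 1))
--     half = _matpow(m, k // 2)
--     sq = _mul(half, half)
--     return sq if k % 2 == 0 else _mul(sq, m)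
--
--
-- def narayana_cows(n: int) -> int:
--     if n < 0:
--         raise ValueError("n must be non-negative")
--     if n <= 2:
--         return 1
--     # state (C(k), C(k-1), C(k-2)) advances by the companion matrix M
--     m = ((1, 0, 1), (1, 0, 0), (0, 1, 0))
--     p = _matpow(m, n - 2)
--     # C(n) = first row of M^(n-2) applied to (C(2), C(1), C(0)) = (1, 1, 1)
--     return p[0][0] + p[0][1] + p[0][2]
-- ===== Notes on version B (the rewrite author's own statement) =====
-- stated objective: faster
-- what changed: replaced the linear recurrence loop with binary exponentiation of the 3x3 companion matrix
import Mathlib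
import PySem

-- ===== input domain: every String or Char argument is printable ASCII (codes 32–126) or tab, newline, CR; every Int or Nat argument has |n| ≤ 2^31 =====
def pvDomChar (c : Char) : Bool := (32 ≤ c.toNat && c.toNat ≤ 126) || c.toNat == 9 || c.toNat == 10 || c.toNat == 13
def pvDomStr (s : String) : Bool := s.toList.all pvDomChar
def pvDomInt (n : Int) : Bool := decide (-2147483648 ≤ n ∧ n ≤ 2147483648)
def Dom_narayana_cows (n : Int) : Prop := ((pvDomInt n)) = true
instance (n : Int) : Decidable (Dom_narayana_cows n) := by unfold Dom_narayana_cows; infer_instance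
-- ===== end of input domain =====

-- B replaces A's linear recurrence loop by binary exponentiation of the 3x3 companion matrix (asymptotically fewer steps).

-- ===== PORT A =====
def narayana_cows (n : Int) : Int :=
  if n < 0 then 0   -- Python raises ValueError here; excluded by Pre_
  else if n ≤ 2 then 1
  else
    let s := (PySem.List.pyRange 3 (n + 1) 1).foldl
      (fun (st : Int × Int × Int) _ => (st.2.1, st.2.2, st.2.2 + st.1)) (1, 1, 1)
    s.2.2

-- ===== PORT B =====
-- 3x3 integer matrices as tuples of row-tuples, mirroring Source B
def m3mul (a b : (Int × Int × Int) × (Int × Int × Int) × (Int × Int × Int)) :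
    (Int × Int × Int) × (Int × Int × Int) × (Int × Int × Int) :=
  ((a.1.1 * b.1.1 + a.1.2.1 * b.2.1.1 + a.1.2.2 * b.2.2.1,
    a.1.1 * b.1.2.1 + a.1.2.1 * b.2.1.2.1 + a.1.2.2 * b.2.2.2.1,
    a.1.1 * b.1.2.2 + a.1.2.1 * b.2.1.2.2 + a.1.2.2 * b.2.2.2.2),
   (a.2.1.1 * b.1.1 + a.2.1.2.1 * b.2.1.1 + a.2.1.2.2 * b.2.2.1,
    a.2.1.1 * b.1.2.1 + a.2.1.2.1 * b.2.1.2.1 + a.2.1.2.2 * b.2.2.2.1,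
    a.2.1.1 * b.1.2.2 + a.2.1.2.1 * b.2.1.2.2 + a.2.1.2.2 * b.2.2.2.2),
   (a.2.2.1 * b.1.1 + a.2.2.2.1 * b.2.1.1 + a.2.2.2.2 * b.2.2.1,
    a.2.2.1 * b.1.2.1 + a.2.2.2.1 * b.2.1.2.1 + a.2.2.2.2 * b.2.2.2.1,
    a.2.2.1 * b.1.2.2 + a.2.2.2.1 * b.2.1.2.2 + a.2.2.2.2 * b.2.2.2.2))

def m3pow (m : (Int × Int × Int) × (Int × Int × Int) × (Int × Int × Int)) (k : Nat) :
    (Int × Int × Int) × (Int × Int × Int) × (Int × Int × Int) :=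
  if h : k = 0 then ((1, 0, 0), (0, 1, 0), (0, 0, 1))
  else
    let half := m3pow m (k / 2)
    let sq := m3mul half half
    if k % 2 = 0 then sq else m3mul sq m
decreasing_by exact Nat.div_lt_self (Nat.pos_of_ne_zero h) (by decide)

def narayana_cows_alt (n : Int) : Int :=
  if n < 0 then 0   -- Python raises ValueError here; excluded by Pre_
  else if n ≤ 2 then 1
  else
    let m : (Int × Int × Int) × (Int × Int × Int) × (Int × Int × Int) :=
      ((1, 0, 1), (1, 0, 0), (0, 1, 0))
    let p := m3pow m (n - 2).toNat
    p.1.1 + p.1.2.1 + p.1.2.2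

-- ===== PRECONDITION & SPEC =====
-- A raises ValueError for n < 0; Pre_ excludes exactly those inputs.
def Pre_narayana_cows (n : Int) : Prop := 0 ≤ n
instance (n : Int) : Decidable (Pre_narayana_cows n) := by unfold Pre_narayana_cows; infer_instance
def pvWitness_narayana_cows : Int := 5

def Spec_narayana_cows (n : Int) (out : Int) : Prop := out = narayana_cows_alt n
instance (n : Int) (out : Int) : Decidable (Spec_narayana_cows n out) := by unfold Spec_narayana_cows; infer_instance

-- ===== CLAIM (what is proved, stated in full; the proofs are below) =====
def Claim_equal_narayana_cows : Prop := ∀ (n : Int), Dom_narayana_cows n → Pre_narayana_cows n → Spec_narayana_cows n (narayana_cows n)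

-- ===== LEMMAS AND PROOFS =====

-- the mathematical Narayana's cows sequence
def narC : Nat → Int
  | 0 => 1
  | 1 => 1
  | 2 => 1
  | k + 3 => narC (k + 2) + narC k

theorem m3mul_assoc (a b c : (Int × Int × Int) × (Int × Int × Int) × (Int × Int × Int)) :
    m3mul (m3mul a b) c = m3mul a (m3mul b c) := by
  simp only [m3mul, Prod.mk.injEq]
  exact ⟨⟨by ring, by ring, by ring⟩, ⟨by ring, by ring, by ring⟩, by ring, by ring, by ring⟩

-- plain left-iterated power, the reference semantics of m3pow
def m3powL (m : (Int × Int × Int) × (Int × Int × Int) × (Int × Int × Int)) :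
    Nat → (Int × Int × Int) × (Int × Int × Int) × (Int × Int × Int)
  | 0 => ((1, 0, 0), (0, 1, 0), (0, 0, 1))
  | k + 1 => m3mul m (m3powL m k)

theorem m3mul_id_left (a : (Int × Int × Int) × (Int × Int × Int) × (Int × Int × Int)) :
    m3mul ((1, 0, 0), (0, 1, 0), (0, 0, 1)) a = a := by
  obtain ⟨⟨_, _, _⟩, ⟨_, _, _⟩, _, _, _⟩ := a
  simp only [m3mul, Prod.mk.injEq]
  exact ⟨⟨by ring, by ring, by ring⟩, ⟨by ring, by ring, by ring⟩, by ring, by ring, by ring⟩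

theorem m3mul_id_right (a : (Int × Int × Int) × (Int × Int × Int) × (Int × Int × Int)) :
    m3mul a ((1, 0, 0), (0, 1, 0), (0, 0, 1)) = a := by
  obtain ⟨⟨_, _, _⟩, ⟨_, _, _⟩, _, _, _⟩ := a
  simp only [m3mul, Prod.mk.injEq]
  exact ⟨⟨by ring, by ring, by ring⟩, ⟨by ring, by ring, by ring⟩, by ring, by ring, by ring⟩

theorem m3powL_add (m : (Int × Int × Int) × (Int × Int × Int) × (Int × Int × Int)) (a b : Nat) :
    m3powL m (a + b) = m3mul (m3powL m a) (m3powL m b) := by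
  induction a with
  | zero => simp [m3powL, m3mul_id_left]
  | succ a ih =>
      have : a + 1 + b = (a + b) + 1 := by omega
      rw [this]
      simp only [m3powL, ih, ← m3mul_assoc]

theorem m3pow_eq (m : (Int × Int × Int) × (Int × Int × Int) × (Int × Int × Int)) (k : Nat) :
    m3pow m k = m3powL m k := by
  induction k using Nat.strong_induction_on with
  | _ k ih =>
    rw [m3pow]
    by_cases h : k = 0
    · simp [h, m3powL]
    · simp only [h, dite_false]
      have ih2 := ih (k / 2) (Nat.div_lt_self (Nat.pos_of_ne_zero h) (by decide))
      by_cases hp : k % 2 = 0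
      · have hk : k / 2 + k / 2 = k := by omega
        simp only [hp, if_true, ih2, ← m3powL_add, hk]
      · have hk : k / 2 + k / 2 + 1 = k := by omega
        have h1 : m3powL m 1 = m := by simp [m3powL, m3mul_id_right]
        simp only [hp, if_false, ih2, ← m3powL_add]
        calc m3mul (m3powL m (k / 2 + k / 2)) m
            = m3mul (m3powL m (k / 2 + k / 2)) (m3powL m 1) := by rw [h1]
          _ = m3powL m (k / 2 + k / 2 + 1) := by rw [← m3powL_add]
          _ = m3powL m k := by rw [hk]

-- applying a matrix to a column vector
def m3app (m : (Int × Int × Int) × (Int × Int × Int) × (Int × Int × Int))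
    (v : Int × Int × Int) : Int × Int × Int :=
  (m.1.1 * v.1 + m.1.2.1 * v.2.1 + m.1.2.2 * v.2.2,
   m.2.1.1 * v.1 + m.2.1.2.1 * v.2.1 + m.2.1.2.2 * v.2.2,
   m.2.2.1 * v.1 + m.2.2.2.1 * v.2.1 + m.2.2.2.2 * v.2.2)

theorem m3powL_app (k : Nat) :
    m3app (m3powL ((1, 0, 1), (1, 0, 0), (0, 1, 0)) k) (1, 1, 1)
      = (narC (k + 2), narC (k + 1), narC k) := by
  induction k with
  | zero => simp [m3powL, m3app, narC]
  | succ k ih =>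
      have step : ∀ (a b : (Int × Int × Int) × (Int × Int × Int) × (Int × Int × Int))
          (v : Int × Int × Int), m3app (m3mul a b) v = m3app a (m3app b v) := by
        intro a b v
        simp only [m3mul, m3app, Prod.mk.injEq]
        exact ⟨by ring, by ring, by ring⟩
      rw [m3powL, step, ih]
      have h3 : narC (k + 3) = narC (k + 2) + narC k := rfl
      simp [m3app, h3]

theorem alt_eq_narC (n : Int) (h : 3 ≤ n) :
    narayana_cows_alt n = narC ((n - 2).toNat + 2) := by
  have h0 : ¬ n < 0 := by omega
  have h2 : ¬ n ≤ 2 := by omega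
  simp only [narayana_cows_alt, h0, h2, if_false]
  rw [m3pow_eq]
  have := m3powL_app ((n - 2).toNat)
  have happ : (m3app (m3powL ((1, 0, 1), (1, 0, 0), (0, 1, 0)) ((n - 2).toNat)) (1, 1, 1)).1
      = narC ((n - 2).toNat + 2) := by rw [this]
  simp only [m3app] at happ
  omega

theorem a_loop (j : Nat) :
    (PySem.List.pyRange 3 (3 + (j : Int)) 1).foldl
      (fun (st : Int × Int × Int) _ => (st.2.1, st.2.2, st.2.2 + st.1)) (1, 1, 1)
      = (narC j, narC (j + 1), narC (j + 2)) := by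
  induction j with
  | zero =>
      rw [PySem.List.pyRange_one_eq_nil (by omega)]
      simp [narC]
  | succ j ih =>
      have hc : (3 : Int) + ((j : Int) + 1) = (3 + (j : Int)) + 1 := by ring
      rw [Nat.cast_add, Nat.cast_one, hc,
        PySem.List.pyRange_one_succ_right (by omega : (3 : Int) ≤ 3 + (j : Int)),
        List.foldl_append, ih]
      have h3 : narC (j + 3) = narC (j + 2) + narC j := rfl
      simp [h3]

theorem a_eq_narC (n : Int) (h : 3 ≤ n) :
    narayana_cows n = narC ((n - 2).toNat + 2) := by
  have h0 : ¬ n < 0 := by omega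
  have h2 : ¬ n ≤ 2 := by omega
  simp only [narayana_cows, h0, h2, if_false]
  have hcast : (3 : Int) + (((n - 2).toNat : Nat) : Int) = n + 1 := by
    have := Int.toNat_of_nonneg (by omega : (0 : Int) ≤ n - 2)
    omega
  rw [← hcast, a_loop]

-- ===== VERDICT (by name: the statement is the Claim_ definition above) =====
theorem narayana_cows_spec : Claim_equal_narayana_cows := by
  intro n _ hpre
  unfold Spec_narayana_cows
  by_cases h3 : 3 ≤ n
  · rw [a_eq_narC n h3, alt_eq_narC n h3]
  · have h0 : ¬ n < 0 := by exact not_lt.mpr hpre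
    have h2 : n ≤ 2 := by omega
    simp [narayana_cows, narayana_cows_alt, h0, h2]
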